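-- pv_equiv track=rewrite | github.com/a-r-joseph/CMSC-201 | Homeworks/hw5/quasi_palindrome.py | quasi_palindrome
-- ===== SOURCE A (Python) =====
-- def quasi_palindrome(word, errors):
--     """
--               A function to determine if a string is a quasi-palindrome given the allowed
--               number of errors
--               :param word: the string to check
--               :param errors: the allowed number of errors to be a quasi-palindrome
--               :return: True or False whether the word is a quasi-palindrome or not
--     """
--
--     reverse_word = []
--     char_list = []
--     for integer in range(len(word)):
--         char_list.append(len(word) - 1 - integer)
--     for i in char_list:
--         reverse_word.append(word[i])
--     reverse_word = ''.join(reverse_word)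
--
--     if reverse_word == word:
--         return True
--     else:
--         error_count = 0
--         for i in range(len(reverse_word)):
--             if reverse_word[i] != word[i]:
--                 error_count += 1
--         if error_count <= (2 * int(errors)):
--             return True
--         else:
--             return False
-- ===== SOURCE B (Python) =====
-- def quasi_palindrome(word, errors):
--     n = len(word)
--     pairs = sum(1 for i in range(n // 2) if word[i] != word[n - 1 - i])
--     return pairs == 0 or pairs <= int(errors)
-- ===== Notes on version B (the rewrite author's own statement) =====
-- stated objective: idiomatic
-- what changed: Two-pointer half scan counting mismatched pairs (never builds an index list or a reversed string), with pairs==0 preserving A's palindrome short-circuit for negative error budgets.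
import Mathlib
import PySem

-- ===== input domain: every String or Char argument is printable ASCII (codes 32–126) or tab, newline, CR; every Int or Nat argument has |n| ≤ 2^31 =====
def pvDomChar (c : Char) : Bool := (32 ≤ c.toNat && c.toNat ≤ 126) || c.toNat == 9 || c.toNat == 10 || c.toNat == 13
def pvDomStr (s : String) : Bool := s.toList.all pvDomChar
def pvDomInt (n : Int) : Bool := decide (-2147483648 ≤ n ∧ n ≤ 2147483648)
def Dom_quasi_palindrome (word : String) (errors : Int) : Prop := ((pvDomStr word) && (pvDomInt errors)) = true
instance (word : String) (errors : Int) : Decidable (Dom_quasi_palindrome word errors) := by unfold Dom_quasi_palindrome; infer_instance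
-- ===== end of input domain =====

-- B replaces A's build-reversed-string-and-count-all-mismatches strategy with a half-length
-- two-pointer scan counting mismatched pairs (idiomatic; never materialises the reversed word).


-- ===== PORT A =====
-- Literal transliteration of A.  Python indexing word[i] is exact here via getD because every
-- index produced by the loops lies in range (len(word)-1-i for i < len(word)).
def quasi_palindrome (word : String) (errors : Int) : Bool :=
  let l := word.toList
  let char_list := (List.range l.length).foldl
    (fun acc integer => acc ++ [l.length - 1 - integer]) ([] : List Nat)
  let reverse_word := char_list.foldl
    (fun acc i => acc ++ [l.getD i ' ']) ([] : List Char)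
  if reverse_word = l then
    true
  else
    let error_count := (List.range reverse_word.length).foldl
      (fun c i => if reverse_word.getD i ' ' ≠ l.getD i ' ' then c + 1 else c) (0 : Int)
    if error_count ≤ 2 * errors then true else false

-- ===== PORT B =====
def quasi_palindrome_alt (word : String) (errors : Int) : Bool :=
  let l := word.toList
  let n := l.length
  let pairs := (List.range (n / 2)).countP (fun i => l.getD i ' ' != l.getD (n - 1 - i) ' ')
  pairs == 0 || decide ((pairs : Int) ≤ errors)

-- ===== PRECONDITION & SPEC =====
def Spec_quasi_palindrome (word : String) (errors : Int) (out : Bool) : Prop := out = quasi_palindrome_alt word errors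
instance (word : String) (errors : Int) (out : Bool) : Decidable (Spec_quasi_palindrome word errors out) := by unfold Spec_quasi_palindrome; infer_instance

-- ===== CLAIM (what is proved, stated in full; the proofs are below) =====
def Claim_equal_quasi_palindrome : Prop := ∀ (word : String) (errors : Int), Dom_quasi_palindrome word errors → Spec_quasi_palindrome word errors (quasi_palindrome word errors)

-- ===== LEMMAS AND PROOFS =====

-- A's append-in-a-loop builds exactly the map.
theorem foldl_append_map {α β : Type} (xs : List α) (g : α → β) (acc : List β) :
    xs.foldl (fun a i => a ++ [g i]) acc = acc ++ xs.map g := by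
  induction xs generalizing acc with
  | nil => simp
  | cons x xs ih => simp [List.foldl_cons, ih]

-- A's counting loop is a countP.
theorem foldl_count {α : Type} (xs : List α) (p : α → Prop) [DecidablePred p] (c : Int) :
    xs.foldl (fun c i => if p i then c + 1 else c) c = c + xs.countP (fun i => decide (p i)) := by
  induction xs generalizing c with
  | nil => simp
  | cons x xs ih =>
    by_cases h : p x <;> simp [List.foldl_cons, h, ih, List.countP_cons] <;> ring

-- countP over List.range as a Finset sum.
theorem countP_range_eq_sum (n : ℕ) (p : ℕ → Bool) :
    (List.range n).countP p = ∑ i ∈ Finset.range n, (if p i then 1 else 0) := by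
  induction n with
  | zero => simp
  | succ n ih =>
    rw [List.range_succ, List.countP_append, Finset.sum_range_succ, ih]
    simp [List.countP_cons]

-- Doubling: a sum of a symmetric indicator vanishing at the middle is twice its first half.
theorem sum_symm_double (n : ℕ) (g : ℕ → ℕ)
    (hsymm : ∀ i < n, g (n - 1 - i) = g i)
    (hmid : ∀ i, n = 2 * i + 1 → g i = 0) :
    ∑ i ∈ Finset.range n, g i = 2 * ∑ i ∈ Finset.range (n / 2), g i := by
  rcases Nat.eq_zero_or_pos n with h0 | hpos
  · simp [h0]
  have hk : n / 2 ≤ n := Nat.div_le_self n 2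
  have hsplit : ∑ i ∈ Finset.range (n / 2), g i + ∑ i ∈ Finset.Ico (n / 2) n, g i
      = ∑ i ∈ Finset.range n, g i := by
    simp only [Finset.range_eq_Ico]
    exact Finset.sum_Ico_consecutive g (Nat.zero_le _) hk
  have hrefl : ∑ i ∈ Finset.Ico (n / 2) n, g ((n - 1) - i)
      = ∑ i ∈ Finset.Ico (n - 1 + 1 - n) (n - 1 + 1 - n / 2), g i := by
    exact Finset.sum_Ico_reflect g (n / 2) (by omega)
  have hcongr : ∑ i ∈ Finset.Ico (n / 2) n, g ((n - 1) - i)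
      = ∑ i ∈ Finset.Ico (n / 2) n, g i := by
    apply Finset.sum_congr rfl
    intro i hi
    rw [Finset.mem_Ico] at hi
    exact hsymm i hi.2
  have hrange : n - 1 + 1 - n = 0 ∧ n - 1 + 1 - n / 2 = n - n / 2 := by omega
  rw [hrange.1, hrange.2] at hrefl
  rcases Nat.even_or_odd n with ⟨k, hk2⟩ | ⟨k, hk2⟩
  · have h1 : n - n / 2 = n / 2 := by omega
    rw [h1] at hrefl
    rw [← Finset.range_eq_Ico] at hrefl
    omega
  · have h1 : n - n / 2 = n / 2 + 1 := by omega
    rw [h1] at hrefl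
    rw [← Finset.range_eq_Ico, Finset.sum_range_succ] at hrefl
    have hm : g (n / 2) = 0 := hmid (n / 2) (by omega)
    omega

-- The mismatch indicator for the halved scan.
theorem pairs_facts (l : List Char) :
    ∑ i ∈ Finset.range l.length,
        (if (l.getD i ' ' != l.getD (l.length - 1 - i) ' ') then 1 else 0)
      = 2 * (List.range (l.length / 2)).countP
          (fun i => l.getD i ' ' != l.getD (l.length - 1 - i) ' ') := by
  rw [countP_range_eq_sum]
  apply sum_symm_double
  · intro i hi
    have : l.length - 1 - (l.length - 1 - i) = i := by omega
    rw [this]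
    have hb : (l.getD (l.length - 1 - i) ' ' != l.getD i ' ')
        = (l.getD i ' ' != l.getD (l.length - 1 - i) ' ') := by
      simp [bne, BEq.comm]
    rw [hb]
  · intro i hmid
    have : l.length - 1 - i = i := by omega
    simp [this]

-- reverse_word (as computed by A) is the reverse of l.
theorem rev_map_eq (l : List Char) :
    (List.range l.length).map (fun i => l.getD (l.length - 1 - i) ' ') = l.reverse := by
  apply List.ext_getElem
  · simp
  · intro i h1 h2
    simp only [List.getElem_map, List.getElem_range, List.getElem_reverse]
    simp at h1 h2
    rw [List.getD_eq_getElem l ' ' (by omega)]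

theorem rev_getD (l : List Char) (i : ℕ) (hi : i < l.length) :
    l.reverse.getD i ' ' = l.getD (l.length - 1 - i) ' ' := by
  rw [List.getD_eq_getElem l.reverse ' ' (by simpa using hi),
      List.getD_eq_getElem l ' ' (by omega)]
  simp only [List.getElem_reverse]

-- ===== VERDICT (by name: the statement is the Claim_ definition above) =====
theorem quasi_palindrome_spec : Claim_equal_quasi_palindrome := by
  intro word errors _
  unfold Spec_quasi_palindrome quasi_palindrome quasi_palindrome_alt
  set l := word.toList with hl
  set n := l.length with hn
  -- normalise A's two building loops
  simp only [foldl_append_map, List.nil_append, List.map_map]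
  have hrev : (List.range n).map ((fun i => l.getD i ' ') ∘ (fun integer => n - 1 - integer))
      = l.reverse := by
    simpa [Function.comp] using rev_map_eq l
  rw [hrev]
  -- counts
  set p : ℕ → Bool := fun i => l.getD i ' ' != l.getD (n - 1 - i) ' ' with hp
  set pairs := (List.range (n / 2)).countP p with hpairs
  have hcount : (List.range l.reverse.length).foldl
      (fun c i => if l.reverse.getD i ' ' ≠ l.getD i ' ' then c + 1 else c) (0 : Int)
      = ((List.range n).countP (fun i => decide (l.reverse.getD i ' ' ≠ l.getD i ' ')) : Int) := by
    rw [List.length_reverse, ← hn, foldl_count]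
    simp
  have hpred : (List.range n).countP (fun i => decide (l.reverse.getD i ' ' ≠ l.getD i ' '))
      = (List.range n).countP p := by
    apply List.countP_congr
    intro i hi
    rw [List.mem_range] at hi
    rw [rev_getD l i (by omega)]
    simp only [hp, ← hn]
    rw [Bool.eq_iff_iff]
    simp only [decide_eq_true_eq, bne_iff_ne, iff_true]
    exact ne_comm
  have hdouble : (List.range n).countP p = 2 * pairs := by
    rw [countP_range_eq_sum]
    simpa [hp] using pairs_facts l
  -- the palindrome test ↔ pairs = 0
  have hiff : l.reverse = l ↔ pairs = 0 := by
    constructor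
    · intro h
      have hz : (List.range n).countP p = 0 := by
        rw [hpred.symm]
        apply List.countP_eq_zero.2
        intro i hi
        rw [List.mem_range] at hi
        simp [h]
      omega
    · intro h
      have hz : (List.range n).countP p = 0 := by omega
      rw [← hpred] at hz
      apply List.ext_getElem (by simp)
      intro i h1 h2
      have hi : i < n := by simpa using h2
      have := List.countP_eq_zero.1 hz i (by simpa using hi)
      simp only [decide_not, Bool.not_eq_true', decide_eq_false_iff_not, not_not] at this
      rw [List.getD_eq_getElem l.reverse ' ' h1, List.getD_eq_getElem l ' ' h2] at this
      exact this
  by_cases hpal : l.reverse = l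
  · have h0 : pairs = 0 := hiff.1 hpal
    simp [hpal, h0]
  · have h0 : pairs ≠ 0 := fun h => hpal (hiff.2 h)
    rw [if_neg hpal, hcount, hpred, hdouble]
    have hiff2 : ((2 * pairs : ℕ) : Int) ≤ 2 * errors ↔ (pairs : Int) ≤ errors := by
      push_cast; omega
    have h0' : (pairs == 0) = false := by simp [h0]
    rw [h0', Bool.false_or]
    by_cases he : (pairs : Int) ≤ errors
    · simp [he, hiff2.2 he]
    · have hne : ¬ ((2 * pairs : ℕ) : Int) ≤ 2 * errors := fun h2 => he (hiff2.1 h2)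
      simp [he, hne]
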